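-- pv_equiv track=rewrite | github.com/endearqb/AutoWaterSimu | backend/app/material_balance/udm_engine.py | _normalize_global_component_names
-- ===== SOURCE A (Python) =====
-- from typing import Any, Callable, Dict, Iterable, List
--
-- def _normalize_global_component_names(component_names: Iterable[str]) -> List[str]:
--     raw = [str(name or "").strip() for name in component_names]
--     if len(raw) == 0:
--         return []
--     if any(not name for name in raw):
--         return [f"concentration_{idx}" for idx in range(len(raw))]
--     if len(set(raw)) != len(raw):
--         return [f"concentration_{idx}" for idx in range(len(raw))]
--     return raw
-- ===== SOURCE B (Python) =====
-- def _normalize_global_component_names(component_names):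
--     stripped = [str(name or "").strip() for name in component_names]
--     srt = sorted(stripped)
--     if srt and srt[0] and all(a != b for a, b in zip(srt, srt[1:])):
--         return stripped
--     return [f"concentration_{idx}" for idx in range(len(stripped))]
-- ===== Notes on version B (the rewrite author's own statement) =====
-- stated objective: alternative
-- what changed: B validates by sorting the stripped names once: the sorted list's first element detects empty names (the empty string sorts first) and a single adjacent-pair scan detects duplicates, replacing A's any() scan and set-cardinality comparison.
import Mathlib
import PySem

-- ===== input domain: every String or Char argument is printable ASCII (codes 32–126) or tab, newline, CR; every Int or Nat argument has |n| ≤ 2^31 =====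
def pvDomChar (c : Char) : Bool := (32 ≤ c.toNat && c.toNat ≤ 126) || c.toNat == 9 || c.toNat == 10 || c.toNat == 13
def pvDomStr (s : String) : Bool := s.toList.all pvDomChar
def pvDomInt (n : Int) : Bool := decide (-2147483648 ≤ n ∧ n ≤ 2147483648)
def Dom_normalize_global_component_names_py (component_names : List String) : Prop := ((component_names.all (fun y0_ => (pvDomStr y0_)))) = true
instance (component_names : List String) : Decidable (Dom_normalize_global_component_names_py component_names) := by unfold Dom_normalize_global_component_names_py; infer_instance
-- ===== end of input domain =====

-- B validates via one sort of the stripped names: the first sorted element detects empty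
-- names and an adjacent-pair scan detects duplicates; objective: alternative.

-- ===== PORT A =====
-- A: raw = [str(name or "").strip() for name in component_names]; then three separate checks.
def normalize_global_component_names_py (component_names : List String) : List String :=
  let raw := component_names.map (fun name => PySem.Str.strip name)
  if raw.length = 0 then []
  else if raw.any (fun name => name == "") then
    (PySem.List.pyRange 0 (raw.length : Int) 1).map (fun idx => "concentration_" ++ PySem.Int.toStr idx)
  else if (PySem.Set.ofList raw).length ≠ raw.length then
    (PySem.List.pyRange 0 (raw.length : Int) 1).map (fun idx => "concentration_" ++ PySem.Int.toStr idx)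
  else raw

-- ===== PORT B =====
-- B: srt = sorted(stripped); if srt and srt[0] and all(a != b for a, b in zip(srt, srt[1:])): stripped else fallback.
def normalize_global_component_names_py_alt (component_names : List String) : List String :=
  let stripped := component_names.map (fun name => PySem.Str.strip name)
  let srt := PySem.List.sorted stripped (fun x => x) false
  if !srt.isEmpty && srt.headD "" != "" && (srt.zip (srt.drop 1)).all (fun p => p.1 != p.2) then
    stripped
  else
    (PySem.List.pyRange 0 (stripped.length : Int) 1).map (fun idx => "concentration_" ++ PySem.Int.toStr idx)

-- ===== PRECONDITION & SPEC =====
def Spec_normalize_global_component_names_py (component_names : List String) (out : List String) : Prop := out = normalize_global_component_names_py_alt component_names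
instance (component_names : List String) (out : List String) : Decidable (Spec_normalize_global_component_names_py component_names out) := by unfold Spec_normalize_global_component_names_py; infer_instance

-- ===== CLAIM (what is proved, stated in full; the proofs are below) =====
def Claim_equal_normalize_global_component_names_py : Prop := ∀ (component_names : List String), Dom_normalize_global_component_names_py component_names → Spec_normalize_global_component_names_py component_names (normalize_global_component_names_py component_names)

-- ===== LEMMAS AND PROOFS =====

-- the empty string is the least string
lemma pv_empty_le (s : String) : "" ≤ s := by
  rw [String.le_iff_toList_le]
  cases h : s.toList with
  | nil => exact le_refl _
  | cons a t => exact le_of_lt (List.nil_lt_cons a t)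

-- on a ≤-sorted list, the adjacent-pair all-distinct scan decides Nodup
lemma pv_zip_adjacent_nodup (l : List String) (hp : l.Pairwise (· ≤ ·)) :
    ((l.zip (l.drop 1)).all (fun p => p.1 != p.2) = true) ↔ l.Nodup := by
  induction l with
  | nil => simp
  | cons a t ih =>
    rcases List.pairwise_cons.1 hp with ⟨ha, ht⟩
    cases t with
    | nil => simp
    | cons b t' =>
      rcases List.pairwise_cons.1 ht with ⟨hb, _⟩
      simp only [List.drop_succ_cons, List.drop_zero] at ih ⊢
      simp only [List.zip_cons_cons, List.all_cons,
        Bool.and_eq_true, bne_iff_ne, ne_eq, List.nodup_cons, List.mem_cons, not_or]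
      rw [ih ht]
      constructor
      · rintro ⟨hab, hnd⟩
        have hnd2 : (b :: t').Nodup := hnd
        rcases List.nodup_cons.1 hnd2 with ⟨hbt', hnd'⟩
        refine ⟨⟨hab, ?_⟩, hbt', hnd'⟩
        intro hat'
        have h1 : a ≤ b := ha b (List.mem_cons_self)
        have h2 : b ≤ a := hb a hat'
        exact hab (le_antisymm h1 h2)
      · rintro ⟨⟨hab, hat'⟩, hbt', hnd'⟩
        exact ⟨hab, List.nodup_cons.2 ⟨hbt', hnd'⟩⟩

-- len(set(xs)) = len(xs) iff xs has no duplicates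
lemma pvOfList_length_eq_iff (xs : List String) :
    (PySem.Set.ofList xs).length = xs.length ↔ xs.Nodup := by
  constructor
  · intro h
    induction xs with
    | nil => simp
    | cons x t ih =>
      rw [PySem.Set.ofList_cons] at h
      simp only [List.length_cons] at h
      by_cases hx : x ∈ t
      · exfalso
        have hxm : x ∈ PySem.Set.ofList t := (PySem.Set.mem_ofList _ _).2 hx
        have hlt : (PySem.Set.discard (PySem.Set.ofList t) x).length < (PySem.Set.ofList t).length := by
          simp only [PySem.Set.discard]
          exact List.length_filter_lt_length_iff_exists.2 ⟨x, hxm, by simp⟩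
        have hle : (PySem.Set.ofList t).length ≤ t.length := PySem.Set.length_ofList_le t
        omega
      · have heq : PySem.Set.discard (PySem.Set.ofList t) x = PySem.Set.ofList t := by
          simp only [PySem.Set.discard]
          refine List.filter_eq_self.2 ?_
          intro y hy
          have hyt : y ∈ t := (PySem.Set.mem_ofList _ _).1 hy
          have : y ≠ x := fun hyx => hx (hyx ▸ hyt)
          simp [this]
        rw [heq] at h
        exact List.Nodup.cons hx (ih (by omega))
  · intro h
    rw [PySem.Set.ofList_eq_self_of_nodup xs h]

theorem pv_main (component_names : List String) :
    normalize_global_component_names_py component_names =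
      normalize_global_component_names_py_alt component_names := by
  unfold normalize_global_component_names_py normalize_global_component_names_py_alt
  set raw := component_names.map (fun name => PySem.Str.strip name) with hraw
  set srt := PySem.List.sorted raw (fun x => x) false with hsrt
  have hperm : srt.Perm raw := PySem.List.sorted_perm raw (fun x => x) false
  by_cases hnil : raw = []
  · simp [hnil]
  · have hlen : raw.length ≠ 0 := by simpa [List.length_eq_zero_iff] using hnil
    have hsne : srt ≠ [] := by
      intro hc; rw [hc] at hperm; exact hnil hperm.symm.eq_nil
    rw [if_neg hlen]
    have hpw : srt.Pairwise (· ≤ ·) := by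
      simpa using PySem.List.sorted_pairwise raw (fun x => x)
    -- head = "" iff some stripped name is empty
    have hhead : (srt.headD "" = "") ↔ raw.any (fun name => name == "") = true := by
      cases hs : srt with
      | nil => exact absurd hs hsne
      | cons s0 rest =>
        simp only [List.headD_cons, List.any_eq_true, beq_iff_eq]
        constructor
        · intro h0
          exact ⟨"", hperm.mem_iff.1 (hs ▸ (h0 ▸ List.mem_cons_self)), rfl⟩
        · rintro ⟨s, hsmem, rfl⟩
          have h1 : s0 ≤ "" := by
            have hs' : PySem.List.sorted raw (fun x => x) = s0 :: rest := by
              rw [← hsrt]; exact hs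
            have := PySem.List.key_head_sorted_le raw (fun x => x) hs'
            exact this "" hsmem
          exact le_antisymm h1 (pv_empty_le s0)
    have hnd : ((srt.zip (srt.drop 1)).all (fun p => p.1 != p.2) = true) ↔ raw.Nodup := by
      rw [pv_zip_adjacent_nodup srt hpw]
      exact hperm.nodup_iff
    by_cases hok : (srt.headD "" ≠ "") ∧ (srt.zip (srt.drop 1)).all (fun p => p.1 != p.2) = true
    · -- valid on both sides
      have hany : raw.any (fun name => name == "") = false := by
        rcases hok with ⟨h1, _⟩
        cases hc : raw.any (fun name => name == "") with
        | false => rfl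
        | true => exact absurd (hhead.2 hc) h1
      have hnodup : raw.Nodup := hnd.1 hok.2
      have hset : ¬ (PySem.Set.ofList raw).length ≠ raw.length :=
        not_not_intro ((pvOfList_length_eq_iff raw).2 hnodup)
      have he : srt.isEmpty = false := by
        cases hs : srt with
        | nil => exact absurd hs hsne
        | cons s0 rest => rfl
      have hcond : (!srt.isEmpty && srt.headD "" != "" && (srt.zip (srt.drop 1)).all (fun p => p.1 != p.2)) = true := by
        rw [he, hok.2]
        simp only [Bool.not_false, Bool.and_true, Bool.true_and, bne_iff_ne, ne_eq]
        simpa [List.headD_eq_head?_getD] using hok.1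
      rw [if_neg (by simp [hany]), if_neg hset, if_pos hcond]
    · -- invalid on both sides
      rw [if_neg (show ¬ (!srt.isEmpty && srt.headD "" != "" && (srt.zip (srt.drop 1)).all (fun p => p.1 != p.2)) = true by
        simp only [Bool.and_eq_true, Bool.not_eq_true', bne_iff_ne, ne_eq]
        rintro ⟨⟨-, h1⟩, h2⟩
        exact hok ⟨h1, h2⟩)]
      rcases not_and_or.1 hok with h1 | h2
      · have hany : raw.any (fun name => name == "") = true := hhead.1 (not_not.1 h1)
        rw [if_pos hany]
      · have hnodup : ¬ raw.Nodup := fun hc => h2 (hnd.2 hc)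
        have hset : (PySem.Set.ofList raw).length ≠ raw.length := fun hc =>
          hnodup ((pvOfList_length_eq_iff raw).1 hc)
        by_cases hany : raw.any (fun name => name == "") = true
        · rw [if_pos hany]
        · rw [if_neg hany, if_pos hset]

-- ===== VERDICT (by name: the statement is the Claim_ definition above) =====
theorem normalize_global_component_names_py_spec : Claim_equal_normalize_global_component_names_py := by
  intro component_names _
  unfold Spec_normalize_global_component_names_py
  exact pv_main component_names
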